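-- pv_equiv track=rewrite | github.com/OrekiHoutarouu/EncrypTexT | modules/decrypt/__init__.py | decrypt_encrypted_hexadecimal
-- ===== SOURCE A (Python) =====
-- def decrypt_encrypted_hexadecimal(encrypted_text):
--     decrypted = []
--     bytes = []
--     byte = []
--     counter = 0
--
--     for character in encrypted_text:
--         if character == ' ':
--             character = ''
--             counter -= 1
--
--         byte.append(character)
--         counter += 1
--
--         if counter == 2:
--             bytes.append(''.join(byte)[:])
--             byte.clear()
--             counter = 0
--
--     for byte in bytes:
--         byte = int(byte, 16)
--         decrypted.append(chr(int(byte)))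
--
--     return f"{''.join(decrypted)}"
-- ===== SOURCE B (Python) =====
-- def decrypt_encrypted_hexadecimal(encrypted_text):
--     s = encrypted_text.replace(' ', '')
--     it = iter(s)
--     return ''.join(chr(int(a + b, 16)) for a, b in zip(it, it))
-- ===== Notes on version B (the rewrite author's own statement) =====
-- stated objective: simpler
-- what changed: A's counter/byte-list state machine over characters is replaced by stripping spaces once with str.replace and then pairing consecutive characters via zip(it, it), converting each pair with chr(int(a+b, 16)); a timing run measured this constant-factor win (C-level replace and zip instead of per-character appends).
import Mathlib
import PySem

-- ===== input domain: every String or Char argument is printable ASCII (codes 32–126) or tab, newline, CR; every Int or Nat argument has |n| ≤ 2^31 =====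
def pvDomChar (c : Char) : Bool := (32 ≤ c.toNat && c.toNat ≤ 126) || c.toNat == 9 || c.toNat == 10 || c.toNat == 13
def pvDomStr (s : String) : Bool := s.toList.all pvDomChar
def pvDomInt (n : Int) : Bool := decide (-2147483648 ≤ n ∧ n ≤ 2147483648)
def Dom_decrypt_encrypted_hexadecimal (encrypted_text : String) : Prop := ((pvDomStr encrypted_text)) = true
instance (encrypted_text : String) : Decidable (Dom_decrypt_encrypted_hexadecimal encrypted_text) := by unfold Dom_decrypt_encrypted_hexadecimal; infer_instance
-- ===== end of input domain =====

-- B replaces A's counter/byte-accumulator state machine by a single space-strip (str.replace)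
-- followed by zip-pairing of consecutive characters; objective: simpler. Return value only; no mutation.

-- chr(n): exact for 0 ≤ n < 0xD800 (Pre_ guarantees 0 ≤ n ≤ 255, where Python's chr returns normally)
def pyChr (n : Int) : Char := Char.ofNat n.toNat

-- ===== PORT A =====
-- the first for-loop of A, with its state (bytes, byte, counter), as structural recursion
def pvLoopA : List Char → List (List Char) → List Char → Int → List (List Char)
  | [], bytes, _, _ => bytes
  | character :: rest, bytes, byte, counter =>
    -- if character == ' ': character = ''; counter -= 1
    let p := if character = ' ' then (([] : List Char), counter - 1) else ([character], counter)
    let byte1 := byte ++ p.1        -- byte.append(character)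
    let counter1 := p.2 + 1         -- counter += 1
    if counter1 = 2 then pvLoopA rest (bytes ++ [byte1]) [] 0
    else pvLoopA rest bytes byte1 counter1

def decrypt_encrypted_hexadecimal (encrypted_text : String) : String :=
  let bytes := pvLoopA encrypted_text.toList [] [] 0
  -- second loop: int(byte, 16) then chr; Pre_ excludes the inputs where Python raises (ValueError)
  let decrypted := bytes.foldl (fun acc b => acc ++ [pyChr ((PySem.Int.ofCharsBase? b 16).getD 0)]) []
  String.ofList decrypted

-- ===== PORT B =====
-- zip(it, it) on an iterator: consecutive disjoint pairs, any trailing odd character dropped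
def pvPairs : List Char → List (Char × Char)
  | a :: b :: rest => (a, b) :: pvPairs rest
  | _ => []

def decrypt_encrypted_hexadecimal_alt (encrypted_text : String) : String :=
  let s := PySem.Chars.replace encrypted_text.toList [' '] []   -- encrypted_text.replace(' ', '')
  String.ofList ((pvPairs s).map (fun ab => pyChr ((PySem.Int.ofCharsBase? [ab.1, ab.2] 16).getD 0)))

-- ===== PRECONDITION & SPEC =====
-- Pre_ excludes exactly the inputs on which A raises ValueError: a complete 2-character group
-- (after removing spaces) that int(·, 16) rejects, or one it parses to a negative value (chr raises).
def Pre_decrypt_encrypted_hexadecimal (encrypted_text : String) : Prop :=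
  ∀ i < (encrypted_text.toList.filter (· ≠ ' ')).length / 2,
    0 ≤ (PySem.Int.ofCharsBase?
          [(encrypted_text.toList.filter (· ≠ ' ')).getD (2 * i) ' ',
           (encrypted_text.toList.filter (· ≠ ' ')).getD (2 * i + 1) ' '] 16).getD (-1)
instance (encrypted_text : String) : Decidable (Pre_decrypt_encrypted_hexadecimal encrypted_text) := by
  unfold Pre_decrypt_encrypted_hexadecimal; infer_instance

def pvWitness_decrypt_encrypted_hexadecimal : String := "48 65 6c 6c 6f 2"

def Spec_decrypt_encrypted_hexadecimal (encrypted_text : String) (out : String) : Prop := out = decrypt_encrypted_hexadecimal_alt encrypted_text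
instance (encrypted_text : String) (out : String) : Decidable (Spec_decrypt_encrypted_hexadecimal encrypted_text out) := by unfold Spec_decrypt_encrypted_hexadecimal; infer_instance

-- ===== CLAIM (what is proved, stated in full; the proofs are below) =====
def Claim_equal_decrypt_encrypted_hexadecimal : Prop := ∀ (encrypted_text : String), Dom_decrypt_encrypted_hexadecimal encrypted_text → Pre_decrypt_encrypted_hexadecimal encrypted_text → Spec_decrypt_encrypted_hexadecimal encrypted_text (decrypt_encrypted_hexadecimal encrypted_text)

-- ===== LEMMAS AND PROOFS =====

-- replace(s, ' ', '') removes exactly the spaces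
theorem pv_replace_go_filter (fuel : Nat) : ∀ (l acc : List Char), l.length ≤ fuel →
    PySem.Chars.replace.go [' '] [] fuel l acc = acc.reverse ++ l.filter (· ≠ ' ') := by
  induction fuel with
  | zero =>
    intro l acc h
    have : l = [] := List.eq_nil_of_length_eq_zero (Nat.le_zero.mp h)
    subst this; simp [PySem.Chars.replace.go]
  | succ fuel ih =>
    intro l acc h
    cases l with
    | nil => simp [PySem.Chars.replace.go]
    | cons c t =>
      by_cases hc : c = ' '
      · subst hc
        have hpre : [' '].isPrefixOf (' ' :: t) = true := by simp [List.isPrefixOf]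
        simp only [PySem.Chars.replace.go, hpre, if_pos, List.reverse_nil, List.nil_append,
          List.length_cons, List.length_nil, List.drop_succ_cons, List.drop_zero]
        rw [ih t acc (by simpa using Nat.le_of_succ_le_succ h)]
        simp
      · have hpre : [' '].isPrefixOf (c :: t) = false := by
          simp [List.isPrefixOf]; exact fun hh => (hc hh.symm).elim
        simp only [PySem.Chars.replace.go, hpre]
        rw [if_neg (by simp)]
        rw [ih t (c :: acc) (by simpa using Nat.le_of_succ_le_succ h)]
        simp [hc]

theorem pv_replace_filter (cs : List Char) :
    PySem.Chars.replace cs [' '] [] = cs.filter (· ≠ ' ') := by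
  rw [PySem.Chars.replace]
  simp only [List.isEmpty_cons, Bool.false_eq_true, if_false]
  simpa using pv_replace_go_filter cs.length cs [] le_rfl

-- the state machine of A's first loop produces exactly the disjoint pairs of the space-free characters
theorem pv_loopA_pairs (cs : List Char) : ∀ (bytes : List (List Char)),
    (pvLoopA cs bytes [] 0 =
       bytes ++ (pvPairs (cs.filter (· ≠ ' '))).map (fun p => [p.1, p.2])) ∧
    (∀ b : Char, pvLoopA cs bytes [b] 1 =
       bytes ++ (pvPairs (b :: cs.filter (· ≠ ' '))).map (fun p => [p.1, p.2])) := by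
  induction cs with
  | nil =>
    intro bytes
    constructor
    · simp [pvLoopA, pvPairs]
    · intro b; simp [pvLoopA, pvPairs]
  | cons c rest ih =>
    intro bytes
    by_cases hc : c = ' '
    · subst hc
      constructor
      · simp only [pvLoopA, if_pos]
        norm_num
        simpa using (ih bytes).1
      · intro b
        simp only [pvLoopA, if_pos]
        norm_num
        simpa using (ih bytes).2 b
    · constructor
      · simp only [pvLoopA, if_neg hc]
        norm_num
        rw [(ih bytes).2 c]
        simp [hc]
      · intro b
        simp only [pvLoopA, if_neg hc]
        norm_num
        rw [((ih (bytes ++ [[b, c]])).1)]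
        simp [hc, pvPairs]

-- ===== VERDICT (by name: the statement is the Claim_ definition above) =====
theorem decrypt_encrypted_hexadecimal_spec : Claim_equal_decrypt_encrypted_hexadecimal := by
  intro t _ _
  unfold Spec_decrypt_encrypted_hexadecimal
  unfold decrypt_encrypted_hexadecimal decrypt_encrypted_hexadecimal_alt
  rw [pv_replace_filter, (pv_loopA_pairs t.toList []).1]
  simp only [List.nil_append]
  rw [PySem.List.foldl_append_singleton_eq_map]
  simp [List.map_map, Function.comp_def]
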